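-- pv_equiv track=rewrite | github.com/BarnabyShearer/aoc | aoc20221217a.py | shapes
-- ===== SOURCE A (Python) =====
-- def shapes(data):
--     return [
--         {
--             (x, y)
--             for x in range(4)
--             for y in range(4)
--             if f"\n\n\n{s}".split("\n")[-y - 1][x : x + 1] == "#"
--         }
--         for s in data.split("\n\n")
--     ]
-- ===== SOURCE B (Python) =====
-- def shapes(data):
--     result = []
--     for s in data.split("\n\n"):
--         mask = 0
--         for y, line in enumerate(reversed(s.split("\n")[-4:])):
--             for x, ch in enumerate(line):
--                 if x < 4 and ch == "#":
--                     mask |= 1 << (4 * x + y)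
--         result.append({(x, y) for x in range(4) for y in range(4) if mask >> (4 * x + y) & 1})
--     return result
-- ===== Notes on version B (the rewrite author's own statement) =====
-- stated objective: alternative
-- what changed: B scans each block's characters once (enumerate over the bottom-four lines) to encode the filled cells into a single 16-bit integer bitmask, then decodes the set from the mask's bits, instead of A's probing of the 16 fixed coordinates each with a fresh re-split of the block and a one-character slice.
import Mathlib
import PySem

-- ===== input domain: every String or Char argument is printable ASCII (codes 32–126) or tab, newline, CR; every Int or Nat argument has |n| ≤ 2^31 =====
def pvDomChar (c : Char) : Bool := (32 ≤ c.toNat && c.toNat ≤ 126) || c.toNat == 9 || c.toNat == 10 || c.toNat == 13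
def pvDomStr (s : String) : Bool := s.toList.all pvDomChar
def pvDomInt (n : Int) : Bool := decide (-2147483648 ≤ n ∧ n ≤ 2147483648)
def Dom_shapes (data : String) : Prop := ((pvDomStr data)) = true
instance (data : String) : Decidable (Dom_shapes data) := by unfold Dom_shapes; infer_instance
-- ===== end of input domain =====

-- B encodes each block's bottom-aligned cells into a single 16-bit integer bitmask in one
-- data-driven character pass, then decodes the set from the mask's bits, instead of A's
-- probing of the 16 fixed coordinates with a fresh re-split of the string and a
-- one-character slice per probe (objective: alternative).

-- ===== PORT A =====
-- s.split(sep) for the constant non-empty separators is PySem.Chars.splitOn on the code points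
-- (PySem.Str.split? unwrapped: the separator is never empty, so Python never raises here).
def shapes (data : String) : List (List (Int × Int)) :=
  (PySem.Chars.splitOn data.toList ['\n', '\n']).map (fun s =>
    (PySem.List.pyRange 0 4 1).foldl (fun acc x =>
      (PySem.List.pyRange 0 4 1).foldl (fun acc y =>
        if PySem.List.slice (PySem.List.pyGetD (PySem.Chars.splitOn ('\n' :: '\n' :: '\n' :: s) ['\n']) (-y - 1) []) (some x) (some (x + 1)) == ['#']
        then PySem.Set.add acc (x, y) else acc) acc) [])

-- ===== PORT B =====
-- reversed(s.split("\n")[-4:]) is the slice then List.reverse; enumerate is PySem.List.enumerate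
-- ((index, element) pairs from 0); mask is a nonnegative Python int built with | and <<
-- (PySem.Int.bor / Lean's <<< — exact on ints); 'mask >> k & 1' truthiness is '≠ 0'.
def shapes_alt (data : String) : List (List (Int × Int)) :=
  (PySem.Chars.splitOn data.toList ['\n', '\n']).map (fun s =>
    let mask : Int :=
      (PySem.List.enumerate ((PySem.List.slice (PySem.Chars.splitOn s ['\n']) (some (-4)) none).reverse)).foldl
        (fun (m : Int) (p : Int × List Char) =>
          (PySem.List.enumerate p.2).foldl
            (fun (m : Int) (q : Int × Char) => if q.1 < 4 ∧ q.2 = '#' then PySem.Int.bor m ((1 : Int) <<< ((4 * q.1 + p.1).toNat)) else m) m) 0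
    (PySem.List.pyRange 0 4 1).foldl (fun acc x =>
      (PySem.List.pyRange 0 4 1).foldl (fun acc y =>
        if PySem.Int.band (mask >>> ((4 * x + y).toNat)) 1 ≠ 0 then PySem.Set.add acc (x, y) else acc) acc) [])

-- ===== PRECONDITION & SPEC =====
def Spec_shapes (data : String) (out : List (List (Int × Int))) : Prop := out = shapes_alt data
instance (data : String) (out : List (List (Int × Int))) : Decidable (Spec_shapes data out) := by unfold Spec_shapes; infer_instance

-- ===== CLAIM =====
def Claim_equal_shapes : Prop := ∀ (data : String), Dom_shapes data → Spec_shapes data (shapes data)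

-- ===== LEMMAS AND PROOFS =====
lemma go_acc (sep : List Char) (fuel : ℕ) (l cur : List Char) (acc : List (List Char)) :
    PySem.Chars.splitOn.go sep fuel l cur acc = acc.reverse ++ PySem.Chars.splitOn.go sep fuel l cur [] := by
  induction fuel generalizing l cur acc with
  | zero => simp [PySem.Chars.splitOn.go]
  | succ n ih =>
    cases l with
    | nil => simp [PySem.Chars.splitOn.go]
    | cons c rest =>
      rw [PySem.Chars.splitOn.go]
      rw [PySem.Chars.splitOn.go]
      split_ifs with h
      · rw [ih _ _ (cur.reverse :: acc), ih _ _ [cur.reverse]]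
        simp
      · exact ih _ _ _

lemma splitOn_nl_cons (cs : List Char) :
    PySem.Chars.splitOn ('\n' :: cs) ['\n'] = [] :: PySem.Chars.splitOn cs ['\n'] := by
  unfold PySem.Chars.splitOn
  rw [show ('\n' :: cs).length + 1 = (cs.length + 1) + 1 by simp]
  rw [PySem.Chars.splitOn.go]
  have hp : List.isPrefixOf ['\n'] ('\n' :: cs) = true := by simp [List.isPrefixOf]
  rw [if_pos hp]
  simp only [List.length_cons, List.drop_succ_cons, List.reverse_nil]
  rw [go_acc]
  rfl

lemma go_ne_nil (sep : List Char) (fuel : ℕ) (l cur : List Char) (acc : List (List Char)) :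
    PySem.Chars.splitOn.go sep fuel l cur acc ≠ [] := by
  induction fuel generalizing l cur acc with
  | zero => simp [PySem.Chars.splitOn.go]
  | succ n ih =>
    cases l with
    | nil => simp [PySem.Chars.splitOn.go]
    | cons c rest =>
      rw [PySem.Chars.splitOn.go]
      split_ifs with h
      · exact ih _ _ _
      · exact ih _ _ _

lemma splitOn_ne_nil (cs : List Char) : PySem.Chars.splitOn cs ['\n'] ≠ [] :=
  go_ne_nil _ _ _ _ _

lemma take_one_drop (l : List Char) (n : ℕ) : (l.drop n).take 1 = (l[n]?).toList := by
  rw [List.take_one, List.head?_drop]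



def encLineAux (y s : Int) (m : Nat) (r : List Char) : Nat :=
  (PySem.List.enumerate r s).foldl
    (fun (m : Nat) (q : Int × Char) => if q.1 < 4 ∧ q.2 = '#' then m ||| (1 <<< ((4 * q.1 + y).toNat)) else m) m

lemma tb_one_shift (i j : Nat) : Nat.testBit (1 <<< i) j = decide (i = j) := by
  rw [Nat.one_shiftLeft, Nat.testBit_two_pow]

lemma step_testBit (m : Nat) (E K : Nat) (c : Prop) [Decidable c] :
    (if c then m ||| (1 <<< E) else m).testBit K = (m.testBit K || (decide c && decide (E = K))) := by
  split_ifs with h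
  · rw [Nat.testBit_or, tb_one_shift]; simp [h]
  · simp [h]

lemma encLineAux_testBit (x y : ℕ) (hx : x < 4) (hy : y < 4) (yr : ℤ) (hyr0 : 0 ≤ yr) (hyr4 : yr < 4) :
    ∀ (r : List Char) (s : ℤ), 0 ≤ s → ∀ (m : ℕ),
    (encLineAux yr s m r).testBit (4 * x + y)
      = (m.testBit (4 * x + y) ||
         (decide (yr = (y : ℤ)) && decide (s ≤ (x : ℤ)) &&
          ((r[((x : ℤ) - s).toNat]?.map (fun c => decide (c = '#'))).getD false))) := by
  intro r
  induction r with
  | nil => intro s hs m; simp [encLineAux, PySem.List.enumerate_nil]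
  | cons c r ih =>
    intro s hs m
    simp only [encLineAux, PySem.List.enumerate_cons, List.foldl_cons]
    rw [show ((PySem.List.enumerate r (s+1)).foldl
        (fun (m : Nat) (q : Int × Char) => if q.1 < 4 ∧ q.2 = '#' then m ||| (1 <<< ((4 * q.1 + yr).toNat)) else m)
        (if s < 4 ∧ c = '#' then m ||| (1 <<< ((4 * s + yr).toNat)) else m)) = encLineAux yr (s+1) _ r from rfl]
    rw [ih (s+1) (by omega), step_testBit]
    rcases lt_trichotomy s (x : ℤ) with hlt | heq | hgt
    · -- s < x : this char's bit is below the target bit; the probed index moves left by one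
      have h2 : (((x : ℤ) - s).toNat) = (((x : ℤ) - (s+1)).toNat) + 1 := by omega
      have h3 : decide (s ≤ (x : ℤ)) = true := by simp; omega
      have h4 : decide (s + 1 ≤ (x : ℤ)) = true := by simp; omega
      have h5 : decide (((4 : ℤ) * s + yr).toNat = 4 * x + y) = false := by
        simp only [decide_eq_false_iff_not]; omega
      rw [h2, h3, h4, h5, List.getElem?_cons_succ]
      simp
    · -- s = x : this is the probed character
      have hs4 : s < (4 : ℤ) := by omega
      have h1 : (((x : ℤ) - s).toNat) = 0 := by omega
      have h2 : decide (s ≤ (x : ℤ)) = true := by simp; omega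
      have h3 : decide (s + 1 ≤ (x : ℤ)) = false := by simp; omega
      have h5 : decide (((4 : ℤ) * s + yr).toNat = 4 * x + y) = decide (yr = (y : ℤ)) := by
        simp only [decide_eq_decide]; omega
      rw [h1, h2, h3, h5, List.getElem?_cons_zero]
      by_cases hc : c = '#' <;> by_cases hyy : yr = (y : ℤ) <;> simp [hc, hyy, hs4]
    · -- s > x : neither this char nor the rest can hit the target bit
      have h3 : decide (s ≤ (x : ℤ)) = false := by simp; omega
      have h4 : decide (s + 1 ≤ (x : ℤ)) = false := by simp; omega
      have h5 : (decide (s < (4:ℤ) ∧ c = '#') && decide (((4 : ℤ) * s + yr).toNat = 4 * x + y)) = false := by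
        by_cases hs4 : s < (4 : ℤ)
        · have hne : ((4 : ℤ) * s + yr).toNat ≠ 4 * x + y := by omega
          simp [hne]
        · simp only [Bool.and_eq_false_iff, decide_eq_false_iff_not]
          left
          rintro ⟨h6, -⟩
          exact hs4 h6
      rw [h3, h4, h5]
      simp

def encAux (s : ℤ) (m : ℕ) (rs : List (List Char)) : ℕ :=
  (PySem.List.enumerate rs s).foldl (fun (m : ℕ) (p : ℤ × List Char) => encLineAux p.1 0 m p.2) m

lemma encAux_testBit (x y : ℕ) (hx : x < 4) (hy : y < 4) :
    ∀ (rs : List (List Char)) (s : ℤ), 0 ≤ s → s + rs.length ≤ 4 → ∀ (m : ℕ),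
    (encAux s m rs).testBit (4 * x + y)
      = (m.testBit (4 * x + y) ||
         (decide (s ≤ (y : ℤ)) &&
          ((rs[((y : ℤ) - s).toNat]?.map (fun r => ((r[x]?.map (fun c => decide (c = '#'))).getD false))).getD false))) := by
  intro rs
  induction rs with
  | nil => intro s hs hlen m; simp [encAux, PySem.List.enumerate_nil]
  | cons r rs ih =>
    intro s hs hlen m
    simp only [encAux, PySem.List.enumerate_cons, List.foldl_cons]
    rw [show ((PySem.List.enumerate rs (s+1)).foldl (fun (m : ℕ) (p : ℤ × List Char) => encLineAux p.1 0 m p.2)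
        (encLineAux s 0 m r)) = encAux (s+1) _ rs from rfl]
    have hs4 : s < 4 := by simp at hlen; omega
    rw [ih (s+1) (by omega) (by simp at hlen ⊢; omega)]
    rw [encLineAux_testBit x y hx hy s hs hs4 r 0 (by omega)]
    rcases lt_trichotomy s (y : ℤ) with hlt | heq | hgt
    · have h2 : (((y : ℤ) - s).toNat) = (((y : ℤ) - (s+1)).toNat) + 1 := by omega
      have h3 : decide (s ≤ (y : ℤ)) = true := by simp; omega
      have h4 : decide (s + 1 ≤ (y : ℤ)) = true := by simp; omega
      have h5 : decide (s = (y : ℤ)) = false := by simp; omega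
      rw [h2, h3, h4, h5, List.getElem?_cons_succ]
      simp
    · have h1 : (((y : ℤ) - s).toNat) = 0 := by omega
      have h3 : decide (s + 1 ≤ (y : ℤ)) = false := by simp; omega
      have h5 : decide (s = (y : ℤ)) = true := by simp; omega
      have h6 : decide (s ≤ (y : ℤ)) = true := by simp; omega
      rw [h1, h3, h5, h6, List.getElem?_cons_zero]
      simp
    · have h3 : decide (s ≤ (y : ℤ)) = false := by simp; omega
      have h4 : decide (s + 1 ≤ (y : ℤ)) = false := by simp; omega
      have h5 : decide (s = (y : ℤ)) = false := by simp; omega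
      rw [h3, h4, h5]
      simp

lemma rowlemma (M : List (List Char)) (hM : M ≠ []) (yn : ℕ) (hy : yn < 4) :
    ((M.drop (M.length - 4)).reverse[yn]?.getD ([] : List Char))
      = PySem.List.pyGetD ([] :: [] :: [] :: M) (-(yn : ℤ) - 1) [] := by
  have hm1 : 1 ≤ M.length := by
    cases M with
    | nil => exact absurd rfl hM
    | cons a t => simp
  have hneg : (-(yn : ℤ) - 1) = -(((yn + 1 : ℕ)) : ℤ) := by push_cast; ring
  rw [hneg, PySem.List.pyGetD_neg_natCast _ (yn+1) _ (by omega) (by simp; omega)]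
  by_cases hlt : yn < M.length
  · -- the probed row exists in M
    have hD : (M.drop (M.length - 4)).length = M.length - (M.length - 4) := by simp
    have hyD : yn < (M.drop (M.length - 4)).length := by omega
    rw [List.getElem?_reverse hyD]
    rw [List.getElem?_eq_getElem (by omega), Option.getD_some]
    rw [List.getElem_drop]
    have hidx : ([] :: [] :: [] :: M).length - (yn + 1) = (M.length - 1 - yn) + 3 := by
      simp; omega
    simp only [hidx, List.getElem_cons_succ]
    congr 1
    omega
  · -- past the top of the block: B has no row, A reads one of the padded '' lines
    have hys : (M.drop (M.length - 4)).reverse.length ≤ yn := by simp; omega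
    rw [List.getElem?_eq_none hys, Option.getD_none]
    have hidx : ([] :: [] :: [] :: M).length - (yn + 1) < 3 := by simp; omega
    have h012 : ([] :: [] :: [] :: M).length - (yn + 1) = 0 ∨ ([] :: [] :: [] :: M).length - (yn + 1) = 1 ∨ ([] :: [] :: [] :: M).length - (yn + 1) = 2 := by omega
    rcases h012 with h | h | h <;> simp only [h, List.getElem_cons_zero, List.getElem_cons_succ]

lemma castLine (r : List Char) (y : Int) : ∀ (s : Int) (m : Nat),
    (PySem.List.enumerate r s).foldl
      (fun (m : Int) (q : Int × Char) => if q.1 < 4 ∧ q.2 = '#' then PySem.Int.bor m ((1 : Int) <<< ((4 * q.1 + y).toNat)) else m) (↑m)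
    = ↑(encLineAux y s m r) := by
  induction r with
  | nil => intro s m; simp [encLineAux, PySem.List.enumerate_nil]
  | cons c r ih =>
    intro s m
    rw [PySem.List.enumerate_cons]
    simp only [List.foldl_cons, encLineAux, PySem.List.enumerate_cons]
    by_cases h : s < 4 ∧ c = '#'
    · rw [if_pos h, if_pos h]
      have hcast : PySem.Int.bor (↑m) ((1 : Int) <<< ((4 * s + y).toNat)) = ↑(m ||| (1 <<< ((4 * s + y).toNat))) := by
        have h1 : ((1 : Int) <<< ((4 * s + y).toNat)) = (((1 <<< ((4 * s + y).toNat) : Nat)) : Int) := by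
          exact Int.mem_toNat?.mp rfl
        rw [h1, PySem.Int.bor_natCast]
      rw [hcast]
      exact ih (s + 1) _
    · rw [if_neg h, if_neg h]
      exact ih (s + 1) _

lemma castRows (rs : List (List Char)) : ∀ (s : Int) (m : Nat),
    (PySem.List.enumerate rs s).foldl
      (fun (m : Int) (p : Int × List Char) =>
        (PySem.List.enumerate p.2).foldl
          (fun (m : Int) (q : Int × Char) => if q.1 < 4 ∧ q.2 = '#' then PySem.Int.bor m ((1 : Int) <<< ((4 * q.1 + p.1).toNat)) else m) m) (↑m)
    = ↑(encAux s m rs) := by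
  induction rs with
  | nil => intro s m; simp [encAux, PySem.List.enumerate_nil]
  | cons r rs ih =>
    intro s m
    rw [PySem.List.enumerate_cons]
    simp only [List.foldl_cons, encAux, PySem.List.enumerate_cons]
    rw [castLine r s 0]
    exact ih (s + 1) _


set_option maxHeartbeats 1000000 in
lemma block_eq (s : List Char) :
    (PySem.List.pyRange 0 4 1).foldl (fun acc x =>
      (PySem.List.pyRange 0 4 1).foldl (fun acc y =>
        if PySem.List.slice (PySem.List.pyGetD (PySem.Chars.splitOn ('\n' :: '\n' :: '\n' :: s) ['\n']) (-y - 1) []) (some x) (some (x + 1)) == ['#']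
        then PySem.Set.add acc (x, y) else acc) acc) []
    = (let mask : Int :=
        (PySem.List.enumerate ((PySem.List.slice (PySem.Chars.splitOn s ['\n']) (some (-4)) none).reverse)).foldl
          (fun (m : Int) (p : Int × List Char) =>
            (PySem.List.enumerate p.2).foldl
              (fun (m : Int) (q : Int × Char) => if q.1 < 4 ∧ q.2 = '#' then PySem.Int.bor m ((1 : Int) <<< ((4 * q.1 + p.1).toNat)) else m) m) 0
       (PySem.List.pyRange 0 4 1).foldl (fun acc x =>
        (PySem.List.pyRange 0 4 1).foldl (fun acc y =>
          if PySem.Int.band (mask >>> ((4 * x + y).toNat)) 1 ≠ 0 then PySem.Set.add acc (x, y) else acc) acc) []) := by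
  have hM : PySem.Chars.splitOn ('\n' :: '\n' :: '\n' :: s) ['\n']
      = [] :: [] :: [] :: PySem.Chars.splitOn s ['\n'] := by
    rw [splitOn_nl_cons, splitOn_nl_cons, splitOn_nl_cons]
  set M := PySem.Chars.splitOn s ['\n'] with hMdef
  set rs := (M.drop (M.length - 4)).reverse with hrsdef
  have hslice : PySem.List.slice M (some (-4)) none = M.drop (M.length - 4) :=
    PySem.List.slice_from_neg_ofNat M 4 (by norm_num)
  have hmask :
      (PySem.List.enumerate ((PySem.List.slice M (some (-4)) none).reverse)).foldl
          (fun (m : Int) (p : Int × List Char) =>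
            (PySem.List.enumerate p.2).foldl
              (fun (m : Int) (q : Int × Char) => if q.1 < 4 ∧ q.2 = '#' then PySem.Int.bor m ((1 : Int) <<< ((4 * q.1 + p.1).toNat)) else m) m) 0
        = ((encAux 0 0 rs : ℕ) : ℤ) := by
    rw [hslice]
    exact_mod_cast castRows rs 0 0
  rw [hmask]
  apply PySem.List.foldl_congr_mem
  intro acc x hxmem
  apply PySem.List.foldl_congr_mem
  intro acc2 y hymem
  rw [PySem.List.mem_pyRange_one] at hxmem hymem
  obtain ⟨hx0, hx4⟩ := hxmem
  obtain ⟨hy0, hy4⟩ := hymem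
  apply if_congr _ rfl rfl
  have hxn : x = ((x.toNat : ℕ) : ℤ) := by omega
  have hyn : y = ((y.toNat : ℕ) : ℤ) := by omega
  set xn := x.toNat with hxndef
  set yn := y.toNat with hyndef
  have hxn4 : xn < 4 := by omega
  have hyn4 : yn < 4 := by omega
  have hMne : M ≠ [] := splitOn_ne_nil s
  -- A's probed row is B's row yn
  have hrow : PySem.List.pyGetD (PySem.Chars.splitOn ('\n' :: '\n' :: '\n' :: s) ['\n']) (-y - 1) []
      = rs[yn]?.getD [] := by
    rw [hM, hyn]
    exact (rowlemma M hMne yn hyn4).symm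
  -- A's condition is "character xn of that row is '#'"
  have hA : (PySem.List.slice (PySem.List.pyGetD (PySem.Chars.splitOn ('\n' :: '\n' :: '\n' :: s) ['\n']) (-y - 1) []) (some x) (some (x + 1)) == ['#']) = true
      ↔ (rs[yn]?.getD ([] : List Char))[xn]? = some '#' := by
    rw [hrow, hxn]
    rw [show (((xn : ℤ)) + 1) = ((xn : ℤ) + ((1 : ℕ) : ℤ)) by norm_num]
    rw [PySem.List.slice_natCast_add, take_one_drop]
    rcases h : (rs[yn]?.getD ([] : List Char))[xn]? with _ | c
    · simp
    · simp [Option.toList]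
  -- B's condition is the mask bit 4*xn+yn, which is the same character test
  have hk : ((4 * x + y).toNat) = 4 * xn + yn := by omega
  have htest : Nat.testBit (encAux 0 0 rs) (4 * xn + yn)
      = ((rs[yn]?.map (fun r => ((r[xn]?.map (fun c => decide (c = '#'))).getD false))).getD false) := by
    rw [encAux_testBit xn yn hxn4 hyn4 rs 0 (by omega) (by simp [hrsdef]; omega) 0]
    simp
  have hB : (PySem.Int.band ((((encAux 0 0 rs : ℕ) : ℤ)) >>> (((4 * x + y).toNat : ℕ) : ℤ)) 1 ≠ 0)
      ↔ (rs[yn]?.getD ([] : List Char))[xn]? = some '#' := by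
    have hk2 : (((4 * x + y).toNat : ℕ) : ℤ) = (((4 * xn + yn : ℕ)) : ℤ) := by rw [hk]
    rw [hk2, Int.shiftRight_natCast, show (1 : ℤ) = ((1 : ℕ) : ℤ) from rfl, PySem.Int.band_natCast]
    rw [Int.natCast_ne_zero]
    rw [show ((encAux 0 0 rs >>> (4 * xn + yn)) &&& 1 ≠ 0) ↔ (Nat.testBit (encAux 0 0 rs) (4 * xn + yn) = true) by
      rw [Nat.testBit, Nat.and_comm]; simp]
    rw [htest]
    rcases h : rs[yn]? with _ | r
    · simp
    · simp only [Option.map_some, Option.getD_some]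
      rcases h2 : r[xn]? with _ | c
      · simp
      · simp
  rw [hA, hB]

-- ===== VERDICT =====
theorem shapes_spec : Claim_equal_shapes := by
  intro data _
  unfold Spec_shapes shapes shapes_alt
  exact List.map_congr_left (fun s _ => block_eq s)
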